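-- pv_equiv track=rewrite | github.com/udz/py | exercise/coderbyte08.py | SimpleSymbols
-- ===== SOURCE A (Python) =====
-- def SimpleSymbols(str):
--     output = True
--     position = 0
--     for char in str:
--         if char.isalpha():
--             if position == 0 or position == (len(str)-1):
--                 output = False
--             elif str[position-1] == '+' and str[position+1] == '+':
--                 pass
--             else:
--                 output = False
--         position += 1
--     return output
-- ===== SOURCE B (Python) =====
-- def SimpleSymbols(str):
--     # Split on '+': a letter is correctly surrounded by '+' exactly when its
--     # segment is a single character strictly between two '+' separators.
--     parts = str.split('+')
--     plus_left = False
--     for i, seg in enumerate(parts):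
--         if i == len(parts) - 1:
--             return not any(c.isalpha() for c in seg)
--         if plus_left:
--             ok = len(seg) == 1 or not any(c.isalpha() for c in seg)
--         else:
--             ok = not any(c.isalpha() for c in seg)
--         if not ok:
--             return False
--         plus_left = True
--     return True
-- ===== Notes on version B (the rewrite author's own statement) =====
-- stated objective: faster
-- what changed: Instead of scanning characters and inspecting each letter's neighbours by index, B splits the string on '+' and judges the segments: first and last segment must be letter-free, and each interior segment must be a single character or letter-free.
import Mathlib
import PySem

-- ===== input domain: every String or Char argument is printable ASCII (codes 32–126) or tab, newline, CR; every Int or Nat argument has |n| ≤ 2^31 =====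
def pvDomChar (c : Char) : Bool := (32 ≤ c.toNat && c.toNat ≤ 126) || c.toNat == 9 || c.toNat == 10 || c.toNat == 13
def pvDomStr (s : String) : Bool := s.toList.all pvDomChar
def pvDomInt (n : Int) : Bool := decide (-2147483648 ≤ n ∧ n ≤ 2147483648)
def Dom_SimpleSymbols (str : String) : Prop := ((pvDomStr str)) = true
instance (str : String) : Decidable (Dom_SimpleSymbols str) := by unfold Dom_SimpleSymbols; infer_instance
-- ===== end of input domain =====

-- B drops A's neighbour inspection entirely: it splits the string on '+' and judges the
-- segments (first/last letter-free, interior segments a single char or letter-free);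
-- same value on every input; measurably faster (C-level split, per-segment checks) by a constant factor.

-- ===== PORT A =====
-- A's loop body: state is (output, position); indexes into the full character list.
def pvStepA (full : List Char) (st : Bool × Int) (char : Char) : Bool × Int :=
  let output := st.1
  let position := st.2
  let output :=
    if PySem.Chars.isalpha char then
      if position = 0 ∨ position = (full.length : Int) - 1 then false
      else if PySem.List.pyGet? full (position - 1) = some '+' ∧
              PySem.List.pyGet? full (position + 1) = some '+' then output
      else false
    else output
  (output, position + 1)

def SimpleSymbols (str : String) : Bool :=
  ((str.toList).foldl (pvStepA str.toList) (true, 0)).1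

-- ===== PORT B =====
-- "not any(c.isalpha() for c in seg)"
def pvNoAlpha (seg : List Char) : Bool := seg.all (fun c => !PySem.Chars.isalpha c)

-- Source B's loop over the parts of str.split('+'), carrying the plus_left flag:
-- the last part is checked letter-free; earlier parts per the flag.
def pvCheckParts : List (List Char) → Bool → Bool
  | [], _ => true
  | [seg], _ => pvNoAlpha seg
  | seg :: q :: rest, plusLeft =>
      (if plusLeft then (seg.length == 1 || pvNoAlpha seg) else pvNoAlpha seg)
        && pvCheckParts (q :: rest) true

def SimpleSymbols_alt (str : String) : Bool :=
  pvCheckParts (str.toList.splitOn '+') false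

-- ===== PRECONDITION & SPEC =====
def Spec_SimpleSymbols (str : String) (out : Bool) : Prop := out = SimpleSymbols_alt str
instance (str : String) (out : Bool) : Decidable (Spec_SimpleSymbols str out) := by unfold Spec_SimpleSymbols; infer_instance

-- ===== CLAIM (what is proved, stated in full; the proofs are below) =====
def Claim_equal_SimpleSymbols : Prop := ∀ (str : String), Dom_SimpleSymbols str → Spec_SimpleSymbols str (SimpleSymbols str)

-- ===== LEMMAS AND PROOFS =====

-- the per-character requirement A imposes: if c is alphabetic, both neighbours must exist and be '+'
def pvFactor (lo no : Option Char) (c : Char) : Bool :=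
  if PySem.Chars.isalpha c then (lo == some '+') && (no == some '+') else true

-- characterisation of A's loop tail: only the previous character (if any) matters
def pvChk : Option Char → List Char → Bool
  | _, [] => true
  | lo, c :: rest => pvFactor lo rest.head? c && pvChk (some c) rest

lemma pvStepA_eq (pre rest' : List Char) (c : Char) (b : Bool) :
    pvStepA (pre ++ c :: rest') (b, (pre.length : Int)) c
      = (b && pvFactor pre.getLast? rest'.head? c, ((pre ++ [c]).length : Int)) := by
  unfold pvStepA
  dsimp only
  by_cases hc : PySem.Chars.isalpha c = true
  · cases pre with
    | nil => cases rest' <;> simp [hc, pvFactor]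
    | cons p0 ps =>
      cases rest' with
      | nil =>
        cases hgl : (p0 :: ps).getLast? <;>
          simp [hc, pvFactor, List.length_append]
      | cons n0 rs =>
        have hlen : ¬ (((p0 :: ps).length : Int) = 0 ∨
            ((p0 :: ps).length : Int) = (((p0 :: ps) ++ c :: n0 :: rs).length : Int) - 1) := by
          push_cast [List.length_append, List.length_cons]
          omega
        have hidx1 : PySem.List.pyGet? ((p0 :: ps) ++ c :: n0 :: rs) (((p0 :: ps).length : Int) - 1)
            = (p0 :: ps).getLast? := by
          have h1 : (((p0 :: ps).length : Int) - 1) = ((ps.length : Nat) : Int) := by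
            push_cast [List.length_cons]; ring
          rw [h1, PySem.List.pyGet?_natCast,
              List.getElem?_append_left (by simp), List.getLast?_eq_getElem?]
          simp
        have hidx2 : PySem.List.pyGet? ((p0 :: ps) ++ c :: n0 :: rs) (((p0 :: ps).length : Int) + 1)
            = some n0 := by
          have h1 : (((p0 :: ps).length : Int) + 1) = (((p0 :: ps).length + 1 : Nat) : Int) := by
            push_cast; ring
          rw [h1, PySem.List.pyGet?_natCast,
              List.getElem?_append_right (by omega)]
          simp
        obtain ⟨p, hp⟩ : ∃ p, (p0 :: ps).getLast? = some p := ⟨_, List.getLast?_cons⟩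
        rw [hp] at hidx1
        have hfacval : pvFactor (p0 :: ps).getLast? (n0 :: rs).head? c = (p == '+' && n0 == '+') := by
          simp [pvFactor, hp, hc]
        rw [Prod.mk.injEq]
        refine ⟨?_, by push_cast [List.length_append, List.length_cons, List.length_nil]; omega⟩
        rw [if_pos hc, if_neg hlen, hfacval]
        by_cases hpn : p = '+' ∧ n0 = '+'
        · have hcnd : PySem.List.pyGet? ((p0 :: ps) ++ c :: n0 :: rs) (((p0 :: ps).length : Int) - 1) = some '+'
              ∧ PySem.List.pyGet? ((p0 :: ps) ++ c :: n0 :: rs) (((p0 :: ps).length : Int) + 1) = some '+' := by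
            rw [hidx1, hidx2, hpn.1, hpn.2]
            exact ⟨rfl, rfl⟩
          rw [if_pos hcnd]
          simp [hpn.1, hpn.2]
        · have hcnd : ¬ (PySem.List.pyGet? ((p0 :: ps) ++ c :: n0 :: rs) (((p0 :: ps).length : Int) - 1) = some '+'
              ∧ PySem.List.pyGet? ((p0 :: ps) ++ c :: n0 :: rs) (((p0 :: ps).length : Int) + 1) = some '+') := by
            rw [hidx1, hidx2]
            intro h
            exact hpn ⟨by simpa using h.1, by simpa using h.2⟩
          have hfac : (p == '+' && n0 == '+') = false := by
            rcases not_and_or.mp hpn with h | h <;> simp [h]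
          rw [if_neg hcnd, hfac, Bool.and_false]
  · simp [hc, pvFactor]

lemma pvFoldA (full : List Char) : ∀ (rest pre : List Char) (b : Bool), full = pre ++ rest →
    (List.foldl (pvStepA full) (b, (pre.length : Int)) rest).1 = (b && pvChk pre.getLast? rest) := by
  intro rest
  induction rest with
  | nil => intro pre b h; simp [pvChk]
  | cons c rest' ih =>
    intro pre b h
    subst h
    rw [List.foldl_cons, pvStepA_eq pre rest' c b,
        ih (pre ++ [c]) (b && pvFactor pre.getLast? rest'.head? c) (by simp)]
    have hgl : (pre ++ [c]).getLast? = some c := by simp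
    have hchk : pvChk pre.getLast? (c :: rest')
        = (pvFactor pre.getLast? rest'.head? c && pvChk (some c) rest') := rfl
    rw [hgl, hchk, Bool.and_assoc]

-- head of a string whose splitOn '+' is known
lemma pvSplitHead (cs : List Char) (h : List Char) (t : List (List Char))
    (hs : cs.splitOn '+' = h :: t) :
    (cs = [] ∧ h = [] ∧ t = []) ∨
    (h = [] ∧ t ≠ [] ∧ cs.head? = some '+') ∨
    (∃ d h', h = d :: h' ∧ cs.head? = some d ∧ d ≠ '+') := by
  cases cs with
  | nil =>
    simp [List.splitOn, List.splitOnP_nil] at hs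
    exact Or.inl ⟨rfl, hs.1, hs.2⟩
  | cons d ds =>
    by_cases hd : d = '+'
    · subst hd
      rw [List.splitOn, List.splitOnP_cons] at hs
      simp at hs
      refine Or.inr (Or.inl ⟨hs.1, ?_, rfl⟩)
      intro ht
      exact List.splitOnP_ne_nil (fun x => x == '+') ds (by rw [hs.2, ht])
    · rw [List.splitOn, List.splitOnP_cons, if_neg (by simp [hd])] at hs
      obtain ⟨h0, t0, hsp⟩ : ∃ h0 t0, ds.splitOnP (fun x => x == '+') = h0 :: t0 := by
        cases hx : ds.splitOnP (fun x => x == '+') with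
        | nil => exact absurd hx (List.splitOnP_ne_nil _ ds)
        | cons a b => exact ⟨a, b, rfl⟩
      rw [hsp] at hs
      simp [List.modifyHead] at hs
      exact Or.inr (Or.inr ⟨d, h0, hs.1.symm, rfl, hd⟩)

-- main bridge: A's neighbour condition equals B's segment judgement
lemma pvChk_eq_parts : ∀ (cs : List Char) (lo : Option Char),
    pvChk lo cs = pvCheckParts (cs.splitOn '+') (lo == some '+') := by
  intro cs
  induction cs with
  | nil =>
    intro lo
    simp [pvChk, List.splitOn, List.splitOnP_nil, pvCheckParts, pvNoAlpha]
  | cons c cs' ih =>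
    intro lo
    have hlhs : pvChk lo (c :: cs') = (pvFactor lo cs'.head? c && pvChk (some c) cs') := rfl
    by_cases hc : c = '+'
    · subst hc
      have hsp : ('+' :: cs').splitOn '+' = [] :: cs'.splitOn '+' := by
        rw [List.splitOn, List.splitOnP_cons]; simp [List.splitOn]
      obtain ⟨h0, t0, hsp'⟩ : ∃ h0 t0, cs'.splitOn '+' = h0 :: t0 := by
        cases hx : cs'.splitOn '+' with
        | nil => exact absurd hx (List.splitOnP_ne_nil _ cs')
        | cons a b => exact ⟨a, b, rfl⟩
      rw [hlhs, ih (some '+'), hsp, hsp']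
      have hfac : pvFactor lo cs'.head? '+' = true := by
        simp [pvFactor, show PySem.Chars.isalpha '+' = false by decide]
      rw [hfac, Bool.true_and]
      have : pvCheckParts ([] :: h0 :: t0) (lo == some '+')
          = ((if (lo == some '+') then ((List.length ([] : List Char) == 1) || pvNoAlpha []) else pvNoAlpha [])
              && pvCheckParts (h0 :: t0) true) := rfl
      rw [this]
      have h1 : (if (lo == some '+') then ((List.length ([] : List Char) == 1) || pvNoAlpha []) else pvNoAlpha []) = true := by
        cases (lo == some '+') <;> simp [pvNoAlpha]
      rw [h1, Bool.true_and]
      simp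
    · have hsp : (c :: cs').splitOn '+' = List.modifyHead (List.cons c) (cs'.splitOn '+') := by
        rw [List.splitOn, List.splitOnP_cons, if_neg (by simp [hc])]; rfl
      obtain ⟨h0, t0, hsp'⟩ : ∃ h0 t0, cs'.splitOn '+' = h0 :: t0 := by
        cases hx : cs'.splitOn '+' with
        | nil => exact absurd hx (List.splitOnP_ne_nil _ cs')
        | cons a b => exact ⟨a, b, rfl⟩
      have hIH : pvChk (some c) cs' = pvCheckParts (h0 :: t0) false := by
        rw [ih (some c), hsp']
        have : ((some c : Option Char) == some '+') = false := by simp [hc]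
        rw [this]
      rw [hlhs, hIH, hsp, hsp']
      have hmod : List.modifyHead (List.cons c) (h0 :: t0) = (c :: h0) :: t0 := rfl
      rw [hmod]
      cases t0 with
      | nil =>
        -- last segment: cs' contains no '+' before its end, so its head is not '+'
        have hhd : cs'.head? ≠ some '+' := by
          rcases pvSplitHead cs' h0 [] hsp' with ⟨he, _, _⟩ | ⟨_, ht, _⟩ | ⟨d, h', _, hh, hd⟩
          · subst he; simp
          · exact absurd rfl ht
          · rw [hh]; simp [hd]
        have hfac : pvFactor lo cs'.head? c = !PySem.Chars.isalpha c := by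
          unfold pvFactor
          have : (cs'.head? == some '+') = false := by
            cases hx : cs'.head? with
            | none => rfl
            | some d => simp; intro hdd; exact hhd (by rw [hx, hdd])
          cases hca : PySem.Chars.isalpha c <;> simp [this]
        rw [hfac]
        show (!PySem.Chars.isalpha c && pvNoAlpha h0) = pvNoAlpha (c :: h0)
        simp [pvNoAlpha]
      | cons q t1 =>
        have hrec : pvCheckParts (h0 :: q :: t1) false = (pvNoAlpha h0 && pvCheckParts (q :: t1) true) := rfl
        have hrhs : pvCheckParts ((c :: h0) :: q :: t1) (lo == some '+')
            = ((if (lo == some '+') then ((c :: h0).length == 1 || pvNoAlpha (c :: h0)) else pvNoAlpha (c :: h0))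
                && pvCheckParts (q :: t1) true) := rfl
        rw [hrec, hrhs, ← Bool.and_assoc]
        congr 1
        -- pvFactor lo cs'.head? c && pvNoAlpha h0 = if-branch on (c::h0)
        cases h0 with
        | nil =>
          have hhd : cs'.head? = some '+' := by
            rcases pvSplitHead cs' [] (q :: t1) hsp' with ⟨_, _, ht⟩ | ⟨_, _, hh⟩ | ⟨d, h', hdh, _, _⟩
            · exact absurd ht (by simp)
            · exact hh
            · exact absurd hdh (by simp)
          unfold pvFactor
          rw [hhd]
          cases hca : PySem.Chars.isalpha c <;>
            cases hpl : (lo == some '+') <;>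
              simp [pvNoAlpha, hca]
        | cons d h' =>
          obtain ⟨hh, hd⟩ : cs'.head? = some d ∧ d ≠ '+' := by
            rcases pvSplitHead cs' (d :: h') (q :: t1) hsp' with ⟨_, hdh, _⟩ | ⟨hdh, _, _⟩ | ⟨e, h'', hdh, hhh, he⟩
            · exact absurd hdh (by simp)
            · exact absurd hdh (by simp)
            · rcases List.cons_eq_cons.mp hdh with ⟨rfl, rfl⟩
              exact ⟨hhh, he⟩
          unfold pvFactor
          rw [hh]
          have hdb : ((some d : Option Char) == some '+') = false := by simp [hd]
          cases hca : PySem.Chars.isalpha c <;>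
            cases hpl : (lo == some '+') <;>
              simp [pvNoAlpha, hca, hdb]

-- ===== VERDICT (by name: the statement is the Claim_ definition above) =====
theorem SimpleSymbols_spec : Claim_equal_SimpleSymbols := by
  intro str _
  unfold Spec_SimpleSymbols SimpleSymbols SimpleSymbols_alt
  have hfold := pvFoldA str.toList str.toList [] true rfl
  simp only [List.length_nil, Nat.cast_zero, List.getLast?_nil, Bool.true_and] at hfold
  rw [hfold, pvChk_eq_parts]
  simp
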